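-- pv_equiv track=rewrite | github.com/Creepmoon/-1-. | lab3/ex 7/ex 7.py | counting_sort_indices
-- ===== SOURCE A (Python) =====
-- def counting_sort_indices(strings, indices, index):
--     count = [0] * 26
--     output = [0] * len(indices)
--     for i in indices:
--         count[ord(strings[i][index]) - ord('a')] += 1
--     for i in range(1, 26):
--         count[i] += count[i - 1]
--     for i in reversed(indices):
--         char_index = ord(strings[i][index]) - ord('a')
--         output[count[char_index] - 1] = i
--         count[char_index] -= 1
--     return output
-- ===== SOURCE B (Python) =====
-- def counting_sort_indices(strings, indices, index):
--     buckets = [[] for _ in range(26)]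
--     for i in indices:
--         buckets[ord(strings[i][index]) - ord('a')].append(i)
--     return [i for b in buckets for i in b]
-- ===== Notes on version B (the rewrite author's own statement) =====
-- stated objective: simpler
-- what changed: Replaces the count array, prefix-sum loop and reversed placement loop with a single forward pass appending each index to one of 26 buckets, then concatenating the buckets in order.
import Mathlib
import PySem

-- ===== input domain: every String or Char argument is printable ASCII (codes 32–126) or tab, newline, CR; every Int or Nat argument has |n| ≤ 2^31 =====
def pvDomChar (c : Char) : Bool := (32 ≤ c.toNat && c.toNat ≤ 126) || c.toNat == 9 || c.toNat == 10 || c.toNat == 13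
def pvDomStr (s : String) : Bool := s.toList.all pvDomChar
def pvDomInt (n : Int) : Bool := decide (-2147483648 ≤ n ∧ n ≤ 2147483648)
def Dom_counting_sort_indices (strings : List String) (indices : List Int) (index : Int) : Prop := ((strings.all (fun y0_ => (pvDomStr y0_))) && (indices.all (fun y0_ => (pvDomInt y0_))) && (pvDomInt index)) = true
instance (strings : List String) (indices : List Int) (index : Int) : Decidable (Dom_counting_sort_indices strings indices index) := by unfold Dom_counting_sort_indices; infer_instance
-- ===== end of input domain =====

-- B replaces A's count array + prefix-sum loop + reversed placement loop by one forward
-- pass into 26 buckets followed by concatenation (same return value; no speed claim).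

-- ===== PORT A =====

-- ord(strings[i][index]) - ord('a'), shared by both ports (both Pythons compute this
-- very expression); the defaults "" / 'a' are never reached under Pre_.
def pvCharCode (strings : List String) (index : Int) (i : Int) : Int :=
  let s := (PySem.List.pyGet? strings i).getD ""
  let c := (PySem.Str.pyGet? s index).getD 'a'
  (c.toNat : Int) - 97

-- one iteration of A's first loop: count[ord(strings[i][index]) - ord('a')] += 1
def pvStep1 (f : Int → Int) (cnt : List Int) (i : Int) : List Int :=
  PySem.List.pySetD cnt (f i) (PySem.List.pyGetD cnt (f i) 0 + 1)

-- one iteration of A's prefix-sum loop: count[i] += count[i - 1]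
def pvStep2 (cnt : List Int) (i : Int) : List Int :=
  PySem.List.pySetD cnt i (PySem.List.pyGetD cnt i 0 + PySem.List.pyGetD cnt (i - 1) 0)

-- one iteration of A's reversed placement loop over the state (output, count)
def pvStep3 (f : Int → Int) (st : List Int × List Int) (i : Int) : List Int × List Int :=
  (PySem.List.pySetD st.1 (PySem.List.pyGetD st.2 (f i) 0 - 1) i,
   PySem.List.pySetD st.2 (f i) (PySem.List.pyGetD st.2 (f i) 0 - 1))

def counting_sort_indices (strings : List String) (indices : List Int) (index : Int) : List Int :=
  let f := pvCharCode strings index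
  let count := List.replicate 26 (0 : Int)
  let output := List.replicate indices.length (0 : Int)
  let count := indices.foldl (pvStep1 f) count
  let count := (PySem.List.pyRange 1 26 1).foldl pvStep2 count
  (indices.reverse.foldl (pvStep3 f) (output, count)).1

-- ===== PORT B =====

-- one iteration of B's loop: buckets[ord(strings[i][index]) - ord('a')].append(i)
def pvStepB (f : Int → Int) (bs : List (List Int)) (i : Int) : List (List Int) :=
  PySem.List.pySetD bs (f i) (PySem.List.pyGetD bs (f i) [] ++ [i])

def counting_sort_indices_alt (strings : List String) (indices : List Int) (index : Int) : List Int :=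
  let f := pvCharCode strings index
  let buckets := indices.foldl (pvStepB f) (List.replicate 26 ([] : List Int))
  buckets.flatten

-- ===== PRECONDITION & SPEC =====
-- Pre_ = exactly the inputs where Python A returns: every used index i is a valid (possibly
-- negative) position in strings, `index` a valid position in that string, and the character's
-- code lies in [71, 122] (codes 71..96 reach count[] through Python's negative-index wrap,
-- which both programs share; any other code makes both raise IndexError).
def Pre_counting_sort_indices (strings : List String) (indices : List Int) (index : Int) : Prop :=
  (indices.all (fun i =>
    match PySem.List.pyGet? strings i with
    | none => false
    | some s =>
      match PySem.Str.pyGet? s index with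
      | none => false
      | some c => decide (71 ≤ c.toNat ∧ c.toNat ≤ 122))) = true
instance (strings : List String) (indices : List Int) (index : Int) : Decidable (Pre_counting_sort_indices strings indices index) := by unfold Pre_counting_sort_indices; infer_instance

def pvWitness_counting_sort_indices : List String × List Int × Int := (["ba", "ab", "Ga"], [0, 2, -2, 1], 0)

def Spec_counting_sort_indices (strings : List String) (indices : List Int) (index : Int) (out : List Int) : Prop := out = counting_sort_indices_alt strings indices index
instance (strings : List String) (indices : List Int) (index : Int) (out : List Int) : Decidable (Spec_counting_sort_indices strings indices index out) := by unfold Spec_counting_sort_indices; infer_instance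

-- ===== CLAIM (what is proved, stated in full; the proofs are below) =====
def Claim_equal_counting_sort_indices : Prop := ∀ (strings : List String) (indices : List Int) (index : Int), Dom_counting_sort_indices strings indices index → Pre_counting_sort_indices strings indices index → Spec_counting_sort_indices strings indices index (counting_sort_indices strings indices index)

-- ===== LEMMAS AND PROOFS =====

-- the position in the 26-slot list that Python index c (-26 ≤ c < 26) actually touches
def pvKey (c : Int) : Nat := (c % 26).toNat
def pvKf (f : Int → Int) (i : Int) : Nat := pvKey (f i)

-- a 26-slot table as a map over range 26
def pvTab {α : Type} (g : Nat → α) : List α := (List.range 26).map g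

def pvCntEq (f : Int → Int) (c : Nat) (l : List Int) : Nat := l.countP (fun i => pvKf f i == c)
def pvCntLt (f : Int → Int) (c : Nat) (l : List Int) : Nat := l.countP (fun i => decide (pvKf f i < c))

-- A's loop-3 state after the suffix l₂ (of pending ++ l₂) has been placed
def pvOutS (f : Int → Int) (l₁ l₂ : List Int) : List Int :=
  (List.range 26).flatMap (fun c => List.replicate (pvCntEq f c l₁) 0 ++ l₂.filter (fun i => pvKf f i == c))
def pvCntS (f : Int → Int) (l₁ l₂ : List Int) : List Int :=
  pvTab (fun c => (pvCntEq f c l₁ : Int) + (pvCntLt f c (l₁ ++ l₂) : Int))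

theorem pvKey_lt (c : Int) : pvKey c < 26 := by
  unfold pvKey; omega

theorem pvKey_natCast (m : Nat) (hm : m < 26) : pvKey (m : Int) = m := by
  unfold pvKey; omega

theorem pvTab_length {α : Type} (g : Nat → α) : (pvTab g).length = 26 := by
  simp [pvTab]

theorem pvTab_congr {α : Type} (g₁ g₂ : Nat → α) (h : ∀ j < 26, g₁ j = g₂ j) : pvTab g₁ = pvTab g₂ := by
  unfold pvTab
  apply List.map_congr_left
  intro x hx
  exact h x (List.mem_range.mp hx)

theorem pvTab_get {α : Type} (g : Nat → α) (d : α) (c : Int) (h1 : -26 ≤ c) (h2 : c < 26) :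
    PySem.List.pyGetD (pvTab g) c d = g (pvKey c) := by
  rcases le_or_gt 0 c with hc | hc
  · have h3 : c < ((pvTab g).length : Int) := by rw [pvTab_length]; exact_mod_cast h2
    rw [PySem.List.pyGetD_eq_getElem (pvTab g) d hc h3]
    have hk : pvKey c = c.toNat := by unfold pvKey; omega
    rw [hk]
    simp [pvTab]
  · have hk0 : 0 < (-c).toNat := by omega
    have hk1 : (-c).toNat ≤ (pvTab g).length := by rw [pvTab_length]; omega
    have hc' : c = -(((-c).toNat : Nat) : Int) := by omega
    rw [hc', PySem.List.pyGetD_neg_natCast _ _ _ hk0 hk1]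
    have hk : pvKey (-(((-c).toNat : Nat) : Int)) = (pvTab g).length - (-c).toNat := by
      rw [pvTab_length]; unfold pvKey; omega
    rw [hk]
    simp [pvTab]

theorem pvTab_set {α : Type} (g : Nat → α) (c : Int) (v : α) (h1 : -26 ≤ c) (h2 : c < 26) :
    PySem.List.pySetD (pvTab g) c v = pvTab (fun j => if j = pvKey c then v else g j) := by
  have hset : ∀ m : Nat, m < 26 → (pvTab g).set m v = pvTab (fun j => if j = m then v else g j) := by
    intro m hm
    apply List.ext_getElem (by simp [pvTab])
    intro n h1 h2
    simp [pvTab, List.getElem_set]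
    rcases eq_or_ne n m with h | h
    · subst h; simp
    · simp [h, (Ne.symm h)]
  rcases le_or_gt 0 c with hc | hc
  · rw [PySem.List.pySetD_of_nonneg (pvTab g) v hc]
    have hk : pvKey c = c.toNat := by unfold pvKey; omega
    rw [← hk]
    exact hset _ (pvKey_lt c)
  · have hlen : (pvTab g).length = 26 := pvTab_length g
    have hidx : PySem.List.pySetD (pvTab g) c v = (pvTab g).set (pvKey c) v := by
      simp only [PySem.List.pySetD, PySem.List.pySet?, PySem.List.pyIdx?]
      rw [if_neg (by omega : ¬ 0 ≤ c), if_pos (by omega : -((pvTab g).length : Int) ≤ c)]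
      simp only [Option.map_some, Option.getD_some]
      congr 1
      unfold pvKey; omega
    rw [hidx]
    exact hset _ (pvKey_lt _)

-- counting: countP (< c+1) = countP (< c) + countP (= c)
theorem pvCntLt_succ (f : Int → Int) (c : Nat) (l : List Int) :
    pvCntLt f (c + 1) l = pvCntLt f c l + pvCntEq f c l := by
  induction l with
  | nil => simp [pvCntLt, pvCntEq]
  | cons a t ih =>
    simp only [pvCntLt, pvCntEq, List.countP_cons, beq_iff_eq, decide_eq_true_eq] at ih ⊢
    split_ifs <;> omega

-- countP (< 26) = length (keys are mod 26)
theorem pvCntLt_26 (f : Int → Int) (l : List Int) : pvCntLt f 26 l = l.length := by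
  unfold pvCntLt
  rw [List.countP_eq_length]
  intro a _
  exact decide_eq_true (pvKey_lt (f a))

-- block-length sum of the first n classes
theorem pvSum_cntEq (f : Int → Int) (n : Nat) (l : List Int) :
    ((List.range n).map (fun c => pvCntEq f c l)).sum = pvCntLt f n l := by
  induction n with
  | zero => simp [pvCntLt]
  | succ n ih =>
    rw [List.range_succ]
    simp [ih, pvCntLt_succ]

-- LOOP 1
theorem pvLoop1 (f : Int → Int) (l : List Int) (hf : ∀ i ∈ l, -26 ≤ f i ∧ f i < 26) (g : Nat → Int) :
    l.foldl (pvStep1 f) (pvTab g) = pvTab (fun c => g c + (pvCntEq f c l : Int)) := by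
  induction l generalizing g with
  | nil =>
    simp only [List.foldl_nil]
    exact pvTab_congr _ _ (fun j _ => by simp [pvCntEq])
  | cons a t ih =>
    have ha := hf a (List.mem_cons_self)
    simp only [List.foldl_cons]
    have hstep : pvStep1 f (pvTab g) a
        = pvTab (fun j => if j = pvKf f a then g (pvKf f a) + 1 else g j) := by
      unfold pvStep1
      rw [pvTab_get g 0 (f a) ha.1 ha.2, pvTab_set g (f a) _ ha.1 ha.2]
      rfl
    rw [hstep, ih (fun i hi => hf i (List.mem_cons_of_mem a hi))]
    apply pvTab_congr
    intro j hj
    simp only [pvCntEq, List.countP_cons, beq_iff_eq]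
    by_cases h : pvKf f a = j
    · simp only [h]
      push_cast
      omega
    · simp only [if_neg (Ne.symm h), h]
      push_cast
      omega

-- LOOP 2 (prefix sums)
theorem pvLoop2 (g : Nat → Int) (n : Nat) (hn : n ≤ 26) :
    (PySem.List.pyRange 1 (n : Int) 1).foldl pvStep2 (pvTab g)
      = pvTab (fun c => if c < n then ((List.range (c + 1)).map g).sum else g c) := by
  induction n with
  | zero =>
    have h0 : PySem.List.pyRange 1 ((0 : Nat) : Int) 1 = [] := by decide
    rw [h0]
    simp only [List.foldl_nil]
    exact pvTab_congr _ _ (fun j _ => by simp)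
  | succ n ih =>
    rcases Nat.eq_zero_or_pos n with hn0 | hn0
    · subst hn0
      have h1 : PySem.List.pyRange 1 ((1 : Nat) : Int) 1 = [] := by decide
      rw [h1]
      simp only [List.foldl_nil]
      apply pvTab_congr
      intro j hj
      split_ifs with h
      · have : j = 0 := by omega
        subst this
        simp
      · rfl
    · have hn26 : n < 26 := by omega
      have hcast : ((n + 1 : Nat) : Int) = ((n : Nat) : Int) + 1 := by push_cast; ring
      rw [hcast, PySem.List.pyRange_one_succ_right (by exact_mod_cast hn0 : (1 : Int) ≤ (n : Int)),
        List.foldl_append, ih (by omega)]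
      simp only [List.foldl_cons, List.foldl_nil]
      unfold pvStep2
      have hb1 : -26 ≤ ((n : Nat) : Int) := by omega
      have hb2 : ((n : Nat) : Int) < 26 := by omega
      have hn1 : ((n : Nat) : Int) - 1 = (((n - 1 : Nat)) : Int) := by omega
      rw [pvTab_get _ 0 ((n : Nat) : Int) hb1 hb2, hn1,
        pvTab_get _ 0 (((n - 1 : Nat)) : Int) (by omega) (by omega),
        pvTab_set _ ((n : Nat) : Int) _ hb1 hb2]
      apply pvTab_congr
      intro j hj
      simp only [pvKey_natCast n hn26, pvKey_natCast (n - 1) (by omega)]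
      rcases eq_or_ne j n with hjn | hjn
      · subst hjn
        rw [if_pos rfl, if_neg (lt_irrefl j), if_pos (by omega : j - 1 < j),
          if_pos (by omega : j < j + 1)]
        have hr2 : j - 1 + 1 = j := by omega
        rw [hr2, List.range_succ, List.map_append, List.sum_append]
        simp only [List.map_cons, List.map_nil, List.sum_cons, List.sum_nil]
        omega
      · rw [if_neg hjn]
        split_ifs with h1 h2 h2 <;> first | rfl | omega

theorem pvSumRange_mono (F : Nat → Nat) {k n : Nat} (h : k ≤ n) :
    ((List.range k).map F).sum ≤ ((List.range n).map F).sum := by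
  induction n with
  | zero =>
    have hk : k = 0 := by omega
    subst hk
    exact le_rfl
  | succ n ih =>
    rcases Nat.eq_or_lt_of_le h with he | hl
    · subst he
      exact le_rfl
    · have hk : k ≤ n := by omega
      rw [List.range_succ, List.map_append, List.sum_append]
      exact le_trans (ih hk) (Nat.le_add_right _ _)

theorem pvMapSum_add (u w : Nat → Nat) (n : Nat) :
    ((List.range n).map (fun c => u c + w c)).sum
      = ((List.range n).map u).sum + ((List.range n).map w).sum := by
  induction n with
  | zero => simp
  | succ n ih =>
    rw [List.range_succ]
    simp only [List.map_append, List.sum_append, List.map_cons, List.map_nil, List.sum_cons,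
      List.sum_nil, ih]
    omega

theorem pvSet_replicate_succ (m : Nat) (t : List Int) (a : Int) :
    (List.replicate (m + 1) (0 : Int) ++ t).set m a = List.replicate m 0 ++ a :: t := by
  rw [List.replicate_succ', List.append_assoc, List.set_append]
  rw [if_neg (by simp)]
  simp

-- setting inside one block of a flatMap of blocks
theorem pvSet_flatMap (F : Nat → List Int) (n k off : Nat) (hk : k < n) (hoff : off < (F k).length) (v : Int) :
    ((List.range n).flatMap F).set ((((List.range k).map (fun c => (F c).length)).sum) + off) v
      = (List.range n).flatMap (fun c => if c = k then (F k).set off v else F c) := by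
  induction n with
  | zero => omega
  | succ n ih =>
    rw [List.range_succ, List.flatMap_append, List.set_append]
    by_cases hkn : k < n
    · have h1 : ((List.range (k + 1)).map (fun c => (F c).length)).sum
          ≤ ((List.range n).map (fun c => (F c).length)).sum := pvSumRange_mono _ (by omega)
      rw [List.range_succ, List.map_append, List.sum_append] at h1
      simp only [List.map_cons, List.map_nil, List.sum_cons, List.sum_nil] at h1
      have hlt : (((List.range k).map (fun c => (F c).length)).sum + off)
          < (List.flatMap F (List.range n)).length := by
        rw [List.length_flatMap]
        omega
      rw [if_pos hlt, ih hkn, List.flatMap_append]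
      congr 1
      simp only [List.flatMap_cons, List.flatMap_nil, List.append_nil]
      rw [if_neg (by omega : ¬ n = k)]
    · have hk : k = n := by omega
      subst hk
      have hge : ¬ (((List.range k).map (fun c => (F c).length)).sum + off)
          < (List.flatMap F (List.range k)).length := by
        rw [List.length_flatMap]
        omega
      rw [if_neg hge]
      have hoffeq : ((List.range k).map (fun c => (F c).length)).sum + off
          - (List.flatMap F (List.range k)).length = off := by
        rw [List.length_flatMap]
        omega
      rw [hoffeq, List.flatMap_append]
      congr 1
      · exact (List.flatMap_congr (fun c hc => by
          simp [(by exact Nat.ne_of_lt (List.mem_range.mp hc) : c ≠ k)])).symm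
      · simp

-- one step of loop 3 moves the head of the pending prefix into its block
theorem pvStep3_eq (f : Int → Int) (l₁ l₂ : List Int) (a : Int) (ha1 : -26 ≤ f a) (ha2 : f a < 26) :
    pvStep3 f (pvOutS f (l₁ ++ [a]) l₂, pvCntS f (l₁ ++ [a]) l₂) a
      = (pvOutS f l₁ (a :: l₂), pvCntS f l₁ (a :: l₂)) := by
  have hk26 := pvKey_lt (f a)
  have hl' : (l₁ ++ [a]) ++ l₂ = l₁ ++ (a :: l₂) := by simp
  have htrue : ∀ j, j = pvKey (f a) → (pvKf f a == j) = true := by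
    intro j hj
    simp [pvKf, hj]
  have hfalse : ∀ j, j ≠ pvKey (f a) → (pvKf f a == j) = false := by
    intro j hj
    simp only [pvKf, beq_eq_false_iff_ne, ne_eq]
    exact fun h => hj h.symm
  have hE : ∀ j, j = pvKey (f a) → pvCntEq f j (l₁ ++ [a]) = pvCntEq f j l₁ + 1 := by
    intro j hj
    simp [pvCntEq, List.countP_append, htrue j hj]
  have hEne : ∀ j, j ≠ pvKey (f a) → pvCntEq f j (l₁ ++ [a]) = pvCntEq f j l₁ := by
    intro j hj
    simp [pvCntEq, List.countP_append, hfalse j hj]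
  unfold pvStep3 pvCntS
  dsimp only
  rw [pvTab_get _ 0 (f a) ha1 ha2]
  simp only [Prod.mk.injEq]
  constructor
  · -- output component
    have hidx : ((pvCntEq f (pvKey (f a)) (l₁ ++ [a]) : Int)
          + (pvCntLt f (pvKey (f a)) ((l₁ ++ [a]) ++ l₂) : Int) - 1)
        = (((((List.range (pvKey (f a))).map
            (fun c => (List.replicate (pvCntEq f c (l₁ ++ [a])) (0 : Int)
              ++ l₂.filter (fun i => pvKf f i == c)).length)).sum
            + pvCntEq f (pvKey (f a)) l₁ : Nat)) : Int) := by
      have hsum : ((List.range (pvKey (f a))).map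
            (fun c => (List.replicate (pvCntEq f c (l₁ ++ [a])) (0 : Int)
              ++ l₂.filter (fun i => pvKf f i == c)).length)).sum
          = pvCntLt f (pvKey (f a)) (l₁ ++ [a]) + pvCntLt f (pvKey (f a)) l₂ := by
        have : ∀ c, (List.replicate (pvCntEq f c (l₁ ++ [a])) (0 : Int)
              ++ l₂.filter (fun i => pvKf f i == c)).length
            = pvCntEq f c (l₁ ++ [a]) + pvCntEq f c l₂ := by
          intro c
          simp [pvCntEq, List.countP_eq_length_filter]
        simp only [this]
        rw [pvMapSum_add, pvSum_cntEq, pvSum_cntEq]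
      have hL : pvCntLt f (pvKey (f a)) ((l₁ ++ [a]) ++ l₂)
          = pvCntLt f (pvKey (f a)) (l₁ ++ [a]) + pvCntLt f (pvKey (f a)) l₂ := by
        simp [pvCntLt, List.countP_append, pvKf]
      rw [hsum, hL, hE _ rfl]
      push_cast
      omega
    rw [hidx, PySem.List.pySetD_natCast]
    unfold pvOutS
    rw [pvSet_flatMap _ 26 _ _ hk26 (by
      rw [hE _ rfl]
      simp only [pvCntEq, List.countP_eq_length_filter, List.length_append, List.length_replicate]
      omega) a]
    apply List.flatMap_congr
    intro c hc
    by_cases hck : c = pvKey (f a)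
    · subst hck
      rw [if_pos rfl, hE _ rfl, pvSet_replicate_succ]
      rw [List.filter_cons, if_pos (htrue _ rfl)]
    · rw [if_neg hck, hEne _ hck, List.filter_cons, if_neg (by simp [hfalse _ hck])]
  · -- count component
    rw [pvTab_set _ (f a) _ ha1 ha2]
    apply pvTab_congr
    intro j hj
    by_cases hjk : j = pvKey (f a)
    · rw [if_pos hjk, ← hl', hjk, hE _ rfl]
      push_cast
      omega
    · rw [if_neg hjk, ← hl', hEne _ hjk]

-- LOOP 3
theorem pvLoop3 (f : Int → Int) : ∀ (r l₂ : List Int), (∀ i ∈ r, -26 ≤ f i ∧ f i < 26) →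
    r.foldl (pvStep3 f) (pvOutS f r.reverse l₂, pvCntS f r.reverse l₂)
      = (pvOutS f [] (r.reverse ++ l₂), pvCntS f [] (r.reverse ++ l₂)) := by
  intro r
  induction r with
  | nil => intro l₂ _; simp
  | cons a r' ih =>
    intro l₂ hf
    have ha := hf a (List.mem_cons_self)
    simp only [List.foldl_cons, List.reverse_cons]
    rw [pvStep3_eq f r'.reverse l₂ a ha.1 ha.2]
    rw [ih (a :: l₂) (fun i hi => hf i (List.mem_cons_of_mem a hi))]
    have : r'.reverse ++ a :: l₂ = (r'.reverse ++ [a]) ++ l₂ := by simp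
    rw [this]

theorem pvCast_sum (g : Nat → Nat) (L : List Nat) :
    (L.map (fun c => (g c : Int))).sum = ((L.map g).sum : Int) := by
  induction L with
  | nil => simp
  | cons a t ih => simp [ih]

theorem pvFlatMap_replicate (m : Nat → Nat) (n : Nat) :
    (List.range n).flatMap (fun c => List.replicate (m c) (0 : Int))
      = List.replicate (((List.range n).map m).sum) 0 := by
  induction n with
  | zero => simp
  | succ n ih =>
    rw [List.range_succ, List.flatMap_append, ih, List.map_append, List.sum_append]
    simp only [List.flatMap_cons, List.flatMap_nil, List.append_nil, List.map_cons, List.map_nil,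
      List.sum_cons, List.sum_nil, Nat.add_zero]
    rw [List.replicate_add]

-- A's port computes the concatenation of the per-class filters
theorem pvA_eq (f : Int → Int) (l : List Int) (hf : ∀ i ∈ l, -26 ≤ f i ∧ f i < 26) :
    (l.reverse.foldl (pvStep3 f)
        (List.replicate l.length (0 : Int),
         (PySem.List.pyRange 1 26 1).foldl pvStep2 (l.foldl (pvStep1 f) (List.replicate 26 (0 : Int))))).1
      = (List.range 26).flatMap (fun c => l.filter (fun i => pvKf f i == c)) := by
  have h0 : List.replicate 26 (0 : Int) = pvTab (fun _ => (0 : Int)) := by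
    rw [pvTab, List.map_const', List.length_range]
  rw [h0, pvLoop1 f l hf (fun _ => 0)]
  have hloop2 := pvLoop2 (fun c => (0 : Int) + (pvCntEq f c l : Int)) 26 le_rfl
  rw [(by norm_num : ((26 : Nat) : Int) = (26 : Int))] at hloop2
  rw [hloop2]
  have hcnt : pvTab (fun c => if c < 26
        then ((List.range (c + 1)).map (fun j => (0 : Int) + (pvCntEq f j l : Int))).sum
        else (0 : Int) + (pvCntEq f c l : Int)) = pvCntS f l [] := by
    apply pvTab_congr
    intro j hj
    rw [if_pos hj]
    simp only [zero_add]
    rw [pvCast_sum (fun c => pvCntEq f c l), pvSum_cntEq]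
    rw [List.append_nil, pvCntLt_succ]
    push_cast
    omega
  rw [hcnt]
  have hout : List.replicate l.length (0 : Int) = pvOutS f l [] := by
    symm
    unfold pvOutS
    simp only [List.filter_nil, List.append_nil]
    rw [pvFlatMap_replicate, pvSum_cntEq, pvCntLt_26]
  rw [hout]
  have h3 := pvLoop3 f l.reverse [] (fun i hi => hf i (List.mem_reverse.mp hi))
  rw [List.reverse_reverse] at h3
  rw [h3]
  simp only [List.append_nil]
  unfold pvOutS
  simp [pvCntEq]

-- LOOP B
theorem pvLoopB (f : Int → Int) (l : List Int) (hf : ∀ i ∈ l, -26 ≤ f i ∧ f i < 26) (h : Nat → List Int) :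
    l.foldl (pvStepB f) (pvTab h) = pvTab (fun c => h c ++ l.filter (fun i => pvKf f i == c)) := by
  induction l generalizing h with
  | nil =>
    simp only [List.foldl_nil]
    exact pvTab_congr _ _ (fun j _ => by simp)
  | cons a t ih =>
    have ha := hf a (List.mem_cons_self)
    simp only [List.foldl_cons]
    have hstep : pvStepB f (pvTab h) a
        = pvTab (fun j => if j = pvKf f a then h (pvKf f a) ++ [a] else h j) := by
      unfold pvStepB
      rw [pvTab_get h [] (f a) ha.1 ha.2, pvTab_set h (f a) _ ha.1 ha.2]
      rfl
    rw [hstep, ih (fun i hi => hf i (List.mem_cons_of_mem a hi))]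
    apply pvTab_congr
    intro j hj
    simp only [List.filter_cons, beq_iff_eq]
    by_cases hh : pvKf f a = j
    · simp [hh]
    · simp [hh, Ne.symm hh]

-- B's port computes the same concatenation
theorem pvB_eq (f : Int → Int) (l : List Int) (hf : ∀ i ∈ l, -26 ≤ f i ∧ f i < 26) :
    (l.foldl (pvStepB f) (List.replicate 26 ([] : List Int))).flatten
      = (List.range 26).flatMap (fun c => l.filter (fun i => pvKf f i == c)) := by
  have h0 : List.replicate 26 ([] : List Int) = pvTab (fun _ => ([] : List Int)) := by
    rw [pvTab, List.map_const', List.length_range]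
  rw [h0, pvLoopB f l hf, pvTab, ← List.flatMap_def]
  simp only [List.nil_append]

theorem pvPre_bounds (strings : List String) (indices : List Int) (index : Int)
    (hpre : Pre_counting_sort_indices strings indices index) :
    ∀ i ∈ indices, -26 ≤ pvCharCode strings index i ∧ pvCharCode strings index i < 26 := by
  intro i hi
  unfold Pre_counting_sort_indices at hpre
  rw [List.all_eq_true] at hpre
  have h := hpre i hi
  cases hs : PySem.List.pyGet? strings i with
  | none => simp [hs] at h
  | some s =>
    simp only [hs] at h
    simp only [PySem.Str.pyGet?, PySem.Chars.pyGet?] at h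
    cases hc : PySem.List.pyGet? s.toList index with
    | none => simp [hc] at h
    | some c =>
      rw [hc] at h
      simp only [decide_eq_true_eq] at h
      simp only [pvCharCode, hs, Option.getD_some, PySem.Str.pyGet?, PySem.Chars.pyGet?]
      rw [hc]
      simp only [Option.getD_some]
      omega

-- ===== VERDICT (by name: the statement is the Claim_ definition above) =====
theorem counting_sort_indices_spec : Claim_equal_counting_sort_indices := by
  intro strings indices index _ hpre
  unfold Spec_counting_sort_indices
  have hf := pvPre_bounds strings indices index hpre
  show counting_sort_indices strings indices index = counting_sort_indices_alt strings indices index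
  unfold counting_sort_indices counting_sort_indices_alt
  rw [pvA_eq _ _ hf, pvB_eq _ _ hf]
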